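-- pv_equiv track=rewrite | github.com/zhukovanadezhda/signal-processing | scripts/tools.py | extract_band_coordinates
-- ===== SOURCE A (Python) =====
-- def extract_band_coordinates(array):
--     """Extract the start and end index of each band in a boolean array.
--
--     Args:
--         array (array): array of boolean.
--
--     Returns:
--         list: list of tuples containing the start and end index of each band.
--     """
--     # Initialiser les listes des indices de début et de fin de chaque bande
--     start_indices = []
--     end_indices = []
--
--     # Iterer sur les elements de l'array
--     for i, value in enumerate(array):
--         # Verifier si la valeur courante est True et
--         # la valeur précédente est False (ou c'est le premier element)
--         if value and (i == 0 or not array[i - 1]):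
--             start_indices.append(i)
--
--         # Verifier si la valeur courante est True et
--         # la valeur suivante est False (ou c'est le dernier element)
--         if value and (i == len(array) - 1 or not array[i + 1]):
--             end_indices.append(i)
--
--     # Combiner les indices de début et de fin
--     bands = list(zip(start_indices, end_indices))
--
--     return bands
-- ===== SOURCE B (Python) =====
-- def extract_band_coordinates(array):
--     """Extract the start and end index of each band in a boolean array.
--
--     Single-pass state machine: keep the index of the currently open band
--     (or None); close it on a falling edge, flush at the end of the array.
--     """
--     bands = []
--     start = None
--     for i, value in enumerate(array):
--         if value:
--             if start is None:
--                 start = i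
--         else:
--             if start is not None:
--                 bands.append((start, i - 1))
--                 start = None
--     if start is not None:
--         bands.append((start, len(array) - 1))
--     return bands
-- ===== Notes on version B (the rewrite author's own statement) =====
-- stated objective: simpler
-- what changed: Replaced the two parallel index lists with per-element neighbour lookups plus a zip by a single-pass state machine that keeps only the open band's start index and closes it on falling edges (with an end-of-array flush).
import Mathlib
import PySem

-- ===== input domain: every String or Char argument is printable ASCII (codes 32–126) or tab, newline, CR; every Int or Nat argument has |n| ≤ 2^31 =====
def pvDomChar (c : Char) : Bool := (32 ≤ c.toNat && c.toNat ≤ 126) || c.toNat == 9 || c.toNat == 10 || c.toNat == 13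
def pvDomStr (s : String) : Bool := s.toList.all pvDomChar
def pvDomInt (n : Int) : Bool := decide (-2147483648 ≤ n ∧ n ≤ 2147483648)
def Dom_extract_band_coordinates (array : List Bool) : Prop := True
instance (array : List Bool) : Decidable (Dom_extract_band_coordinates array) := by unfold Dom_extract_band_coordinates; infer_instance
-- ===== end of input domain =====

-- B replaces A's two parallel index lists + zip by a single-pass state machine
-- holding the open band's start index (objective: simpler); return values proved equal.

-- ===== PORT A =====
-- literal transliteration of A: two appended index lists built by one enumerate
-- loop with neighbour lookups, then zipped.
def extract_band_coordinates (array : List Bool) : List (Int × Int) :=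
  let step := fun (acc : List Int × List Int) (p : Int × Bool) =>
    let starts := if p.2 && (p.1 == 0 || !(PySem.List.pyGetD array (p.1 - 1) false))
                  then acc.1 ++ [p.1] else acc.1
    let ends := if p.2 && (p.1 == (array.length : Int) - 1 || !(PySem.List.pyGetD array (p.1 + 1) false))
                then acc.2 ++ [p.1] else acc.2
    (starts, ends)
  let r := (PySem.List.enumerate array 0).foldl step ([], [])
  r.1.zip r.2

-- ===== PORT B =====
-- literal transliteration of B: one fold over enumerate carrying (bands, open start),
-- closing a band on each falling edge, with a final flush.
def extract_band_coordinates_alt (array : List Bool) : List (Int × Int) :=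
  let st := (PySem.List.enumerate array 0).foldl
    (fun (acc : List (Int × Int) × Option Int) (p : Int × Bool) =>
      if p.2 then
        match acc.2 with
        | none => (acc.1, some p.1)
        | some s => (acc.1, some s)
      else
        match acc.2 with
        | none => (acc.1, none)
        | some s => (acc.1 ++ [(s, p.1 - 1)], none))
    ([], none)
  match st.2 with
  | some s => st.1 ++ [(s, (array.length : Int) - 1)]
  | none => st.1

-- ===== PRECONDITION & SPEC =====
def Spec_extract_band_coordinates (array : List Bool) (out : List (Int × Int)) : Prop := out = extract_band_coordinates_alt array
instance (array : List Bool) (out : List (Int × Int)) : Decidable (Spec_extract_band_coordinates array out) := by unfold Spec_extract_band_coordinates; infer_instance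

-- ===== CLAIM (what is proved, stated in full; the proofs are below) =====
def Claim_equal_extract_band_coordinates : Prop := ∀ (array : List Bool), Dom_extract_band_coordinates array → Spec_extract_band_coordinates array (extract_band_coordinates array)

-- ===== LEMMAS AND PROOFS =====

-- local (suffix-level) versions of A's two index lists
def ebcStarts : Int → Bool → List Bool → List Int
  | _, _, [] => []
  | k, prev, v :: rest => (if v && !prev then [k] else []) ++ ebcStarts (k + 1) v rest

def ebcEnds : Int → List Bool → List Int
  | _, [] => []
  | k, v :: rest => (if v && !(rest.headD false) then [k] else []) ++ ebcEnds (k + 1) rest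

-- B's semantics as a structural recursion
def ebcBands : Int → Option Int → List Bool → List (Int × Int)
  | _, none, [] => []
  | k, some s, [] => [(s, k - 1)]
  | k, none, true :: rest => ebcBands (k + 1) (some k) rest
  | k, none, false :: rest => ebcBands (k + 1) none rest
  | k, some s, true :: rest => ebcBands (k + 1) (some s) rest
  | k, some s, false :: rest => (s, k - 1) :: ebcBands (k + 1) none rest

theorem ebc_zip_bands (l : List Bool) : ∀ (k : Int),
    ((ebcStarts k false l).zip (ebcEnds k l) = ebcBands k none l) ∧
    (∀ s : Int, ((s :: ebcStarts k true l).zip (ebcEnds (k - 1) (true :: l)) = ebcBands k (some s) l)) := by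
  induction l with
  | nil =>
      intro k
      constructor
      · simp [ebcStarts, ebcEnds, ebcBands]
      · intro s; simp [ebcStarts, ebcEnds, ebcBands]
  | cons v rest ih =>
      intro k
      constructor
      · cases v
        · simpa [ebcStarts, ebcEnds, ebcBands] using (ih (k + 1)).1
        · have h2 := (ih (k + 1)).2 k
          simpa [ebcStarts, ebcEnds, ebcBands, add_sub_cancel_right] using h2
      · intro s
        cases v
        · have h1 := (ih (k + 1)).1
          simp [ebcStarts, ebcEnds, ebcBands, h1]
        · have h2 := (ih (k + 1)).2 s
          simpa [ebcStarts, ebcEnds, ebcBands, add_sub_cancel_right] using h2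

-- A's fold splits into the two filtered/mapped index lists
theorem ebc_foldA (a : List Bool) (l : List Bool) : ∀ (k : Int) (s0 e0 : List Int),
    (PySem.List.enumerate l k).foldl
      (fun (acc : List Int × List Int) (p : Int × Bool) =>
        (if p.2 && (p.1 == 0 || !(PySem.List.pyGetD a (p.1 - 1) false)) then acc.1 ++ [p.1] else acc.1,
         if p.2 && (p.1 == (a.length : Int) - 1 || !(PySem.List.pyGetD a (p.1 + 1) false)) then acc.2 ++ [p.1] else acc.2))
      (s0, e0)
    = (s0 ++ ((PySem.List.enumerate l k).filter
          (fun p => p.2 && (p.1 == 0 || !(PySem.List.pyGetD a (p.1 - 1) false)))).map (·.1),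
       e0 ++ ((PySem.List.enumerate l k).filter
          (fun p => p.2 && (p.1 == (a.length : Int) - 1 || !(PySem.List.pyGetD a (p.1 + 1) false)))).map (·.1)) := by
  induction l with
  | nil => intro k s0 e0; simp [PySem.List.enumerate_nil]
  | cons v rest ih =>
      intro k s0 e0
      rw [PySem.List.enumerate_cons, List.foldl_cons]
      simp only []
      rw [ih]
      simp only [List.filter_cons]
      by_cases h1 : (v && ((k : Int) == 0 || !(PySem.List.pyGetD a (k - 1) false))) = true <;>
        by_cases h2 : (v && ((k : Int) == (a.length : Int) - 1 || !(PySem.List.pyGetD a (k + 1) false))) = true <;>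
          simp [h1, h2]

-- the global start condition at index init.length equals the local one (prev = last of init)
theorem ebc_filter_starts (a : List Bool) : ∀ (l init : List Bool), a = init ++ l →
    ((PySem.List.enumerate l (init.length : Int)).filter
        (fun p => p.2 && (p.1 == 0 || !(PySem.List.pyGetD a (p.1 - 1) false)))).map (·.1)
    = ebcStarts (init.length : Int) (init.getLastD false) l := by
  intro l
  induction l with
  | nil => intro init _; simp [PySem.List.enumerate_nil, ebcStarts]
  | cons v rest ih =>
      intro init ha
      have hcond : (((init.length : Int) == 0 || !(PySem.List.pyGetD a ((init.length : Int) - 1) false))) = !(init.getLastD false) := by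
        cases init with
        | nil => simp
        | cons x t =>
            have hne : (((x :: t).length : Int) == 0) = false := by
              rw [beq_eq_false_iff_ne]
              simp only [List.length_cons, Nat.cast_add, Nat.cast_one]
              omega
            have hlen : ((x :: t).length : Int) - 1 = ((t.length : Nat) : Int) := by
              simp only [List.length_cons, Nat.cast_add, Nat.cast_one]
              ring
            have hval : a.getD t.length false = (x :: t).getLastD false := by
              subst ha
              rw [List.getD_eq_getElem?_getD, List.getElem?_append_left (by simp)]
              rw [List.getLastD_eq_getLast?, List.getLast?_eq_getElem?]
              simp
            rw [hne, hlen, PySem.List.pyGetD_natCast, hval]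
            simp
      have hrec := ih (init ++ [v]) (by simpa using ha)
      have hlen' : ((init ++ [v]).length : Int) = (init.length : Int) + 1 := by
        simp only [List.length_append, List.length_cons, List.length_nil, Nat.cast_add, Nat.cast_one, Nat.cast_zero]
        ring
      rw [hlen', (by simp : (init ++ [v]).getLastD false = v)] at hrec
      rw [PySem.List.enumerate_cons, List.filter_cons]
      simp only [hcond, ebcStarts]
      split_ifs <;> simp [hrec]

-- the global end condition at index init.length equals the local lookahead one
theorem ebc_filter_ends (a : List Bool) : ∀ (l init : List Bool), a = init ++ l →
    ((PySem.List.enumerate l (init.length : Int)).filter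
        (fun p => p.2 && (p.1 == (a.length : Int) - 1 || !(PySem.List.pyGetD a (p.1 + 1) false)))).map (·.1)
    = ebcEnds (init.length : Int) l := by
  intro l
  induction l with
  | nil => intro init _; simp [PySem.List.enumerate_nil, ebcEnds]
  | cons v rest ih =>
      intro init ha
      have hcond : (((init.length : Int) == (a.length : Int) - 1 || !(PySem.List.pyGetD a ((init.length : Int) + 1) false))) = !(rest.headD false) := by
        cases rest with
        | nil =>
            have hlen : (a.length : Int) = (init.length : Int) + 1 := by
              subst ha
              simp only [List.length_append, List.length_cons, List.length_nil, Nat.cast_add, Nat.cast_one, Nat.cast_zero]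
              ring
            simp [hlen]
        | cons r t =>
            have hne : (((init.length : Int)) == (a.length : Int) - 1) = false := by
              rw [beq_eq_false_iff_ne]
              subst ha
              simp only [List.length_append, List.length_cons, Nat.cast_add, Nat.cast_one]
              omega
            have hidx : ((init.length : Int) + 1) = (((init.length + 1 : Nat)) : Int) := by push_cast; ring
            have hval : a.getD (init.length + 1) false = r := by
              subst ha
              rw [List.getD_eq_getElem?_getD, List.getElem?_append_right (by simp)]
              simp
            rw [hne, hidx, PySem.List.pyGetD_natCast, hval]
            simp
      have hrec := ih (init ++ [v]) (by simpa using ha)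
      have hlen' : ((init ++ [v]).length : Int) = (init.length : Int) + 1 := by
        simp only [List.length_append, List.length_cons, List.length_nil, Nat.cast_add, Nat.cast_one, Nat.cast_zero]
        ring
      rw [hlen'] at hrec
      rw [PySem.List.enumerate_cons, List.filter_cons]
      simp only [hcond, ebcEnds]
      split_ifs <;> simp [hrec]

-- B's fold (plus the final flush) computes ebcBands
theorem ebc_foldB (l : List Bool) : ∀ (k : Int) (bands : List (Int × Int)) (st : Option Int),
    (match ((PySem.List.enumerate l k).foldl
      (fun (acc : List (Int × Int) × Option Int) (p : Int × Bool) =>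
        if p.2 then
          match acc.2 with
          | none => (acc.1, some p.1)
          | some s => (acc.1, some s)
        else
          match acc.2 with
          | none => (acc.1, none)
          | some s => (acc.1 ++ [(s, p.1 - 1)], none))
      (bands, st)).2 with
     | some s => ((PySem.List.enumerate l k).foldl
      (fun (acc : List (Int × Int) × Option Int) (p : Int × Bool) =>
        if p.2 then
          match acc.2 with
          | none => (acc.1, some p.1)
          | some s => (acc.1, some s)
        else
          match acc.2 with
          | none => (acc.1, none)
          | some s => (acc.1 ++ [(s, p.1 - 1)], none))
      (bands, st)).1 ++ [(s, k + (l.length : Int) - 1)]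
     | none => ((PySem.List.enumerate l k).foldl
      (fun (acc : List (Int × Int) × Option Int) (p : Int × Bool) =>
        if p.2 then
          match acc.2 with
          | none => (acc.1, some p.1)
          | some s => (acc.1, some s)
        else
          match acc.2 with
          | none => (acc.1, none)
          | some s => (acc.1 ++ [(s, p.1 - 1)], none))
      (bands, st)).1)
    = bands ++ ebcBands k st l := by
  induction l with
  | nil =>
      intro k bands st
      cases st <;> simp [PySem.List.enumerate_nil, ebcBands]
  | cons v rest ih =>
      intro k bands st
      rw [PySem.List.enumerate_cons]
      simp only [List.foldl_cons]
      have harith : (k + ((v :: rest).length : Int) - 1) = (k + 1) + (rest.length : Int) - 1 := by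
        simp only [List.length_cons, Nat.cast_add, Nat.cast_one]
        ring
      rw [harith]
      cases v <;> cases st <;>
        simp only [ebcBands] <;>
        simp [ih (k + 1)]

-- ===== VERDICT (by name: the statement is the Claim_ definition above) =====
theorem extract_band_coordinates_spec : Claim_equal_extract_band_coordinates := by
  intro a _
  unfold Spec_extract_band_coordinates extract_band_coordinates extract_band_coordinates_alt
  simp only []
  rw [ebc_foldA a a 0 [] []]
  have hs := ebc_filter_starts a a [] (by simp)
  have he := ebc_filter_ends a a [] (by simp)
  simp only [List.length_nil, Nat.cast_zero, List.getLastD] at hs he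
  rw [hs, he]
  simp only [List.nil_append]
  rw [(ebc_zip_bands a 0).1]
  have hB := ebc_foldB a 0 [] none
  simp only [List.nil_append, zero_add] at hB
  exact hB.symm
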